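-- pv_equiv track=rewrite | github.com/strike-digital/sd-tools | node_editor/context_menu/context_menu_ops.py | split_camel_case
-- ===== SOURCE A (Python) =====
-- def split_camel_case(string: str):
--     result = []
--     last_upper = 0
--     for i, c in enumerate(string):
--         if c.isupper():
--             result.append(string[last_upper:i])
--             last_upper = i
--     result.append(string[last_upper:])
--     return result
-- ===== SOURCE B (Python) =====
-- def split_camel_case(string: str):
--     result = [""]
--     for c in string:
--         if c.isupper():
--             result.append(c)
--         else:
--             result[-1] += c
--     return result
-- ===== Notes on version B (the rewrite author's own statement) =====
-- stated objective: alternative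
-- what changed: A tracks the last uppercase index and slices the original string between boundaries; B never indexes or slices at all: it builds the segments character-by-character, starting a fresh segment on each uppercase character and appending every other character to the current last segment.
import Mathlib
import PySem

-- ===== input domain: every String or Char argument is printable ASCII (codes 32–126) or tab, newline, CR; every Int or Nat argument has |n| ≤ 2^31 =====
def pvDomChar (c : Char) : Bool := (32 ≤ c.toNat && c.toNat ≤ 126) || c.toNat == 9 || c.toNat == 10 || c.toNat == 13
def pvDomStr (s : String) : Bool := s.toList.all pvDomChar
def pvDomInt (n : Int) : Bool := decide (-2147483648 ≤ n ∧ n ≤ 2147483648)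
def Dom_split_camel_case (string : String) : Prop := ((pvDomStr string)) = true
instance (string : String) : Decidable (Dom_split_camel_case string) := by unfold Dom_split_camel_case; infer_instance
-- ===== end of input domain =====

-- B replaces A's index-tracking scan that slices the original string between uppercase
-- boundaries with a sliceless builder: segments are grown character-by-character, a fresh
-- segment being started at each uppercase character; objective: alternative decomposition.


-- ===== PORT A =====
-- loop body of A's for-loop: on an uppercase char, append string[last_upper:i] and move last_upper
def pvStepA (string : String) (acc : List String × Int) (p : Int × Char) : List String × Int :=
  if PySem.Chars.isupper p.2 then
    (acc.1 ++ [PySem.Str.slice string (some acc.2) (some p.1)], p.1)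
  else acc

def split_camel_case (string : String) : List String :=
  let r := (PySem.List.enumerate string.toList).foldl (pvStepA string) ([], 0)
  r.1 ++ [PySem.Str.slice string (some r.2) none]

-- ===== PORT B =====
-- result[-1] += c : append the character to the last segment in place
def pvLastAdd : List String → Char → List String
  | [], _ => []
  | s :: t, c =>
    match t with
    | [] => [s.push c]
    | _ => s :: pvLastAdd t c

-- loop body of B's for-loop: uppercase starts a new one-char segment, else extend the last
def pvStepB (result : List String) (c : Char) : List String :=
  if PySem.Chars.isupper c then result ++ [String.ofList [c]] else pvLastAdd result c

def split_camel_case_alt (string : String) : List String :=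
  string.toList.foldl pvStepB [String.ofList []]

-- ===== PRECONDITION & SPEC =====
def Spec_split_camel_case (string : String) (out : List String) : Prop := out = split_camel_case_alt string
instance (string : String) (out : List String) : Decidable (Spec_split_camel_case string out) := by unfold Spec_split_camel_case; infer_instance

-- ===== CLAIM (what is proved, stated in full; the proofs are below) =====
def Claim_equal_split_camel_case : Prop := ∀ (string : String), Dom_split_camel_case string → Spec_split_camel_case string (split_camel_case string)

-- ===== LEMMAS AND PROOFS =====

-- segments of `s` between consecutive cut points
def pvSegs (s : String) : List Int → List String
  | a :: b :: t => PySem.Str.slice s (some a) (some b) :: pvSegs s (b :: t)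
  | _ => []

-- the uppercase positions of cs, enumerated from offset off
def pvCuts (cs : List Char) (off : Int) : List Int :=
  ((PySem.List.enumerate cs off).filter (fun p => PySem.Chars.isupper p.2)).map (·.1)

theorem pvCuts_nil (off : Int) : pvCuts [] off = [] := by
  simp [pvCuts, PySem.List.enumerate_nil]

theorem pvCuts_cons (c : Char) (cs : List Char) (off : Int) :
    pvCuts (c :: cs) off =
      if PySem.Chars.isupper c then off :: pvCuts cs (off + 1) else pvCuts cs (off + 1) := by
  simp only [pvCuts, PySem.List.enumerate_cons, List.filter_cons]
  by_cases h : PySem.Chars.isupper c <;> simp [h]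

theorem pvGetDLast (a d : Int) (l : List Int) :
    (a :: l).getLast?.getD d = l.getLast?.getD a := by
  induction l generalizing a d with
  | nil => simp
  | cons b t ih => simpa [List.getLast?_cons_cons] using ih b d ▸ (ih b a).symm ▸ rfl

-- characterization of A's loop: segments between cut points, plus the last cut
theorem pvFoldA (string : String) (cs : List Char) (off last : Int) (res : List String) :
    (PySem.List.enumerate cs off).foldl (pvStepA string) (res, last)
      = (res ++ pvSegs string (last :: pvCuts cs off), (pvCuts cs off).getLastD last) := by
  induction cs generalizing off last res with
  | nil => simp [PySem.List.enumerate_nil, pvCuts_nil, pvSegs]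
  | cons c cs ih =>
    rw [PySem.List.enumerate_cons, List.foldl_cons, pvCuts_cons]
    by_cases h : PySem.Chars.isupper c
    · simp only [pvStepA, h, if_pos]
      rw [ih]
      rw [List.getLastD_eq_getLast?, List.getLastD_eq_getLast?, pvGetDLast]
      simp [pvSegs]
    · simp only [pvStepA]
      rw [if_neg h, if_neg h, ih]

-- what B's loop computes from a given partial last segment
def pvBuild (p : String) : List Char → List String
  | [] => [p]
  | c :: cs =>
      if PySem.Chars.isupper c then p :: pvBuild (String.ofList [c]) cs
      else pvBuild (p.push c) cs

theorem pvLastAdd_append (acc : List String) (p : String) (c : Char) :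
    pvLastAdd (acc ++ [p]) c = acc ++ [p.push c] := by
  induction acc with
  | nil => rfl
  | cons a t ih =>
    rw [List.cons_append]
    cases ht : t ++ [p] with
    | nil => simp at ht
    | cons b u =>
      rw [show pvLastAdd (a :: b :: u) c = a :: pvLastAdd (b :: u) c from rfl, ← ht, ih]
      simp

-- characterization of B's loop
theorem pvFoldB (cs : List Char) (acc : List String) (p : String) :
    cs.foldl pvStepB (acc ++ [p]) = acc ++ pvBuild p cs := by
  induction cs generalizing acc p with
  | nil => simp [pvBuild]
  | cons c cs ih =>
    simp only [List.foldl_cons, pvStepB, pvBuild]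
    by_cases h : PySem.Chars.isupper c
    · simp only [h, if_pos]
      rw [show acc ++ [p] ++ [String.ofList [c]] = (acc ++ [p]) ++ [String.ofList [c]] from rfl,
        ih (acc ++ [p]) (String.ofList [c])]
      simp
    · simp only [h, if_neg, Bool.false_eq_true, not_false_iff, pvLastAdd_append, ih]

theorem pvSegs_single (s : String) (a : Int) : pvSegs s [a] = [] := rfl

-- the bridge: building char-by-char from a partial slice equals slicing between cut points
theorem pvBuildSlice (s : String) (n : Nat) :
    ∀ (off last : Nat), n = s.toList.length - off → last ≤ off →
    pvBuild (PySem.Str.slice s (some (last : Int)) (some (off : Int))) (s.toList.drop off)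
      = pvSegs s ((last : Int) :: pvCuts (s.toList.drop off) off)
        ++ [PySem.Str.slice s (some ((pvCuts (s.toList.drop off) off).getLastD last)) none] := by
  induction n using Nat.strong_induction_on with
  | _ n ih =>
    intro off last hn hle
    cases hd : s.toList.drop off with
    | nil =>
      have hlen : s.toList.length ≤ off := List.drop_eq_nil_iff.mp hd
      simp only [pvCuts_nil, pvBuild, pvSegs_single, List.getLastD, List.nil_append]
      congr 1
      apply String.toList_inj.mp
      simp only [PySem.Str.toList_slice, PySem.Chars.slice_eq_listSlice,
        PySem.List.slice_natCast, PySem.List.slice_from_natCast]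
      exact List.take_of_length_le (by rw [List.length_drop]; omega)
    | cons c cs' =>
      have hoff : off < s.toList.length := by
        by_contra hcon
        have h0 : s.toList.drop off = [] := List.drop_eq_nil_iff.mpr (by omega)
        rw [h0] at hd; simp at hd
      have hc : s.toList[off]? = some c := by
        have := congrArg (fun l => l[0]?) hd
        simpa [List.getElem?_drop] using this
      have hcs' : s.toList.drop (off + 1) = cs' := by
        have := congrArg (List.drop 1) hd
        simpa [List.drop_drop, Nat.add_comm] using this
      have hlt : s.toList.length - (off + 1) < n := by omega
      have hcast : ((off : Int)) + 1 = (((off + 1 : Nat)) : Int) := by push_cast; ring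
      rw [pvCuts_cons]
      by_cases h : PySem.Chars.isupper c
      · simp only [pvBuild, h, if_pos]
        have hone : String.ofList [c]
            = PySem.Str.slice s (some ((off : Nat) : Int)) (some (((off + 1 : Nat)) : Int)) := by
          apply String.toList_inj.mp
          simp only [PySem.Str.toList_slice, PySem.Chars.slice_eq_listSlice,
            PySem.List.slice_natCast]
          simp [hd]
        rw [hone, ← hcs', hcast, ih _ hlt (off + 1) off rfl (by omega)]
        simp only [pvSegs, List.getLastD_eq_getLast?, pvGetDLast, List.cons_append]
      · simp only [pvBuild, h, if_neg, Bool.false_eq_true, not_false_iff]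
        have hpush : (PySem.Str.slice s (some (last : Int)) (some (off : Int))).push c
            = PySem.Str.slice s (some (last : Int)) (some (((off + 1 : Nat)) : Int)) := by
          apply String.toList_inj.mp
          simp only [String.toList_push, PySem.Str.toList_slice, PySem.Chars.slice_eq_listSlice,
            PySem.List.slice_natCast]
          have h1 : off + 1 - last = (off - last) + 1 := by omega
          rw [h1, List.take_add_one]
          have h2 : (s.toList.drop last)[off - last]? = some c := by
            rw [List.getElem?_drop]
            rwa [Nat.add_sub_cancel' hle]
          simp [h2]
        rw [hpush, ← hcs', hcast, ih _ hlt (off + 1) last rfl (by omega)]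

-- ===== VERDICT (by name: the statement is the Claim_ definition above) =====
theorem split_camel_case_spec : Claim_equal_split_camel_case := by
  intro string _
  show split_camel_case string = split_camel_case_alt string
  have hempty : String.ofList ([] : List Char)
      = PySem.Str.slice string (some ((0 : Nat) : Int)) (some ((0 : Nat) : Int)) := by
    apply String.toList_inj.mp
    simp only [PySem.Str.toList_slice, PySem.Chars.slice_eq_listSlice, PySem.List.slice_natCast]
    simp
  have hB := pvFoldB string.toList [] (String.ofList [])
  have hBr := pvBuildSlice string (string.toList.length - 0) 0 0 rfl (le_refl 0)
  simp only [List.drop_zero] at hBr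
  simp only [split_camel_case, split_camel_case_alt,
    pvFoldA string string.toList 0 0 [], List.nil_append]
  rw [show ([String.ofList ([] : List Char)] : List String) = [] ++ [String.ofList []] from rfl,
    hB, List.nil_append, hempty, hBr]
  simp
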